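-- pv_equiv track=rewrite | github.com/Sravan-k-177/amfoss-tasks | task-04/grid_lock.py | blocks_before_space
-- ===== SOURCE A (Python) =====
-- def word_length_calc(x):
--     x.strip()
--     length = 0
--     for i in x:
--         length += 1
--     return length
--
-- def string_reversal(x):
--     reversed_string = ''
--     for i in range(word_length_calc(x)-1,-1,-1):
--         reversed_string += x[i]
--     return reversed_string
--
-- def blocks_before_space(y):
--     y = string_reversal(y)
--     blocks = 0
--     for i in y:
--         if i == '+':
--             blocks += 1
--         elif i == "-":
--             break
--     return blocks
-- ===== SOURCE B (Python) =====
-- def blocks_before_space(y):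
--     idx = y.rfind('-')
--     return y[idx + 1:].count('+')
-- ===== Notes on version B (the rewrite author's own statement) =====
-- stated objective: faster
-- what changed: Replaces the quadratic character-by-character string reversal and the break-loop with a single rfind for the last dash followed by counting plus signs in the slice after it, with no reversal and no explicit Python loop.
import Mathlib
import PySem

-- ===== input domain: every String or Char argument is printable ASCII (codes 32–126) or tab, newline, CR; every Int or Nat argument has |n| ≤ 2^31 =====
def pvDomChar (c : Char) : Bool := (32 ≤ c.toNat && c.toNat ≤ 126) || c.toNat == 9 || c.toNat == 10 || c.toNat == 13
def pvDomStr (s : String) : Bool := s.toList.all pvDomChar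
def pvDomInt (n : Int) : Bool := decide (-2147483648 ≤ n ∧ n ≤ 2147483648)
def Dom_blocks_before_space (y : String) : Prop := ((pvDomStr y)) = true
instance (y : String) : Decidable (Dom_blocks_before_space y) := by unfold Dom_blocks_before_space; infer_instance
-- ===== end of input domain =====

-- B replaces A's quadratic manual string reversal and break-loop with rfind of the last dash plus a slice count of plus signs.

-- ===== PORT A =====
def word_length_calc (x : String) : Int :=
  let _stripped := PySem.Str.strip x   -- Python computes x.strip() and discards the result
  x.toList.foldl (fun length _ => length + 1) 0

-- x[i]: the index is always in range here, so pyGetD's default ' ' is unreachable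
def string_reversal (x : String) : String :=
  String.ofList ((PySem.List.pyRange (word_length_calc x - 1) (-1) (-1)).foldl
    (fun acc i => acc ++ [PySem.List.pyGetD x.toList i ' ']) [])

-- the 'for i in y: … break' loop with accumulator 'blocks'
def blocksLoop : List Char → Int → Int
  | [], blocks => blocks
  | i :: rest, blocks =>
      if i = '+' then blocksLoop rest (blocks + 1)
      else if i = '-' then blocks
      else blocksLoop rest blocks

def blocks_before_space (y : String) : Int :=
  blocksLoop (string_reversal y).toList 0

-- ===== PORT B =====
def blocks_before_space_alt (y : String) : Int :=
  let idx := PySem.Str.rfind y "-"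
  ((PySem.Str.count (PySem.Str.slice y (some (idx + 1)) none) "+" : Nat) : Int)

-- ===== PRECONDITION & SPEC =====
def Spec_blocks_before_space (y : String) (out : Int) : Prop := out = blocks_before_space_alt y
instance (y : String) (out : Int) : Decidable (Spec_blocks_before_space y out) := by unfold Spec_blocks_before_space; infer_instance

-- ===== CLAIM (what is proved, stated in full; the proofs are below) =====
def Claim_equal_blocks_before_space : Prop := ∀ (y : String), Dom_blocks_before_space y → Spec_blocks_before_space y (blocks_before_space y)

-- ===== LEMMAS AND PROOFS =====

theorem word_length_calc_eq (x : String) : word_length_calc x = (x.toList.length : Int) := by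
  unfold word_length_calc
  rw [PySem.List.foldl_add x.toList (fun _ => 1) 0]
  simp

theorem string_reversal_toList (x : String) :
    (string_reversal x).toList = x.toList.reverse := by
  unfold string_reversal
  rw [PySem.List.foldl_append_singleton_eq_map, word_length_calc_eq,
      PySem.List.pyRange_neg_one_eq_reverse]
  simp only [neg_add_cancel, sub_add_cancel, List.map_reverse]
  rw [show ((x.toList.length : Int)) = PySem.List.len x.toList by simp [PySem.List.len]]
  rw [PySem.List.map_pyGetD_pyRange_zero x.toList ' ']
  simp

theorem blocksLoop_shift (l : List Char) (b : Int) : blocksLoop l b = b + blocksLoop l 0 := by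
  induction l generalizing b with
  | nil => simp [blocksLoop]
  | cons c r ih =>
    simp only [blocksLoop]
    split_ifs
    · rw [ih (b+1), ih (0+1)]; ring
    · ring
    · exact ih b

theorem count_go_plus (s : List Char) (acc : Nat) :
    PySem.Chars.count.go ['+'] s.length s acc = acc + s.count '+' := by
  induction s generalizing acc with
  | nil => simp [PySem.Chars.count.go]
  | cons c r ih =>
    rw [List.length_cons, PySem.Chars.count.go]
    by_cases h : c = '+'
    · subst h
      simp only [List.isPrefixOf, BEq.rfl, Bool.true_and, if_true, List.length_singleton,
        List.drop_one, List.tail_cons, List.count_cons_self]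
      rw [ih]; omega
    · have hp : (['+'].isPrefixOf (c :: r)) = false := by
        simp only [List.isPrefixOf, Bool.and_true]
        exact beq_false_of_ne (fun he => h he.symm)
      rw [hp]
      simp only [if_false, Bool.false_eq_true]
      rw [ih, List.count_cons]
      simp [beq_false_of_ne h]

theorem count_plus (s : List Char) : PySem.Chars.count s ['+'] = s.count '+' := by
  rw [PySem.Chars.count]
  simp only [List.isEmpty_cons, Bool.false_eq_true, if_false]
  rw [count_go_plus s 0]; omega

theorem rfind_go_bounds (s : List Char) (k : Nat) :
    -1 ≤ PySem.Chars.rfind.go s ['-'] k ∧ PySem.Chars.rfind.go s ['-'] k ≤ (k : Int) := by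
  induction k with
  | zero => rw [PySem.Chars.rfind.go]; split_ifs <;> simp
  | succ j ih =>
    rw [PySem.Chars.rfind.go]
    split_ifs with h
    · constructor <;> push_cast <;> omega
    · exact ⟨ih.1, by have := ih.2; push_cast; omega⟩

theorem prefix_dash_append (s : List Char) (c : Char) (j : Nat) (hj : j < s.length) :
    (['-'].isPrefixOf ((s ++ [c]).drop j)) = (['-'].isPrefixOf (s.drop j)) := by
  rw [List.drop_append_of_le_length (by omega)]
  have h2 : (s.drop j) ≠ [] := by simp; omega
  obtain ⟨a, t, he⟩ := List.exists_cons_of_ne_nil h2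
  rw [he]
  simp [List.isPrefixOf]

theorem rfind_go_append (s : List Char) (c : Char) (k : Nat) (hk : k < s.length) :
    PySem.Chars.rfind.go (s ++ [c]) ['-'] k = PySem.Chars.rfind.go s ['-'] k := by
  induction k with
  | zero =>
    rw [PySem.Chars.rfind.go, PySem.Chars.rfind.go]
    have := prefix_dash_append s c 0 hk
    simp only [List.drop_zero] at this
    rw [this]
  | succ j ih =>
    rw [PySem.Chars.rfind.go, PySem.Chars.rfind.go,
        prefix_dash_append s c (j+1) hk, ih (by omega)]

theorem rfind_dash_lt (l : List Char) : PySem.Chars.rfind l ['-'] < (l.length : Int) := by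
  rw [PySem.Chars.rfind]
  cases hl : l.length with
  | zero =>
    rw [PySem.Chars.rfind.go]
    have : l = [] := List.eq_nil_of_length_eq_zero hl
    subst this
    simp [List.isPrefixOf]
  | succ m =>
    rw [PySem.Chars.rfind.go]
    rw [show l.drop (m+1) = [] from List.drop_eq_nil_of_le (by omega)]
    simp only [List.isPrefixOf, Bool.false_eq_true, if_false]
    have := (rfind_go_bounds l m).2
    push_cast
    omega

theorem rfind_dash_ge (l : List Char) : (-1 : Int) ≤ PySem.Chars.rfind l ['-'] := by
  rw [PySem.Chars.rfind]; exact (rfind_go_bounds l l.length).1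

theorem rfind_go_top (l : List Char) (c : Char) :
    PySem.Chars.rfind.go (l ++ [c]) ['-'] l.length =
      if c = '-' then (l.length : Int) else PySem.Chars.rfind l ['-'] := by
  cases hl : l.length with
  | zero =>
    have : l = [] := List.eq_nil_of_length_eq_zero hl
    subst this
    simp only [List.nil_append]
    rw [PySem.Chars.rfind.go, PySem.Chars.rfind]
    simp only [List.length_nil]
    rw [PySem.Chars.rfind.go]
    simp only [List.isPrefixOf, Bool.and_true, Nat.cast_zero]
    by_cases h : c = '-'
    · subst h; simp
    · simp [beq_false_of_ne (fun he => h he.symm), h]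
  | succ m =>
    rw [PySem.Chars.rfind.go]
    rw [show (l ++ [c]).drop (m+1) = [c] by
      rw [List.drop_append_of_le_length (by omega), List.drop_eq_nil_of_le (by omega)]; rfl]
    have hpre : (['-'].isPrefixOf [c]) = (c == '-') := by
      simp [List.isPrefixOf, BEq.comm]
    rw [hpre]
    have hrl : PySem.Chars.rfind l ['-'] = PySem.Chars.rfind.go l ['-'] m := by
      rw [PySem.Chars.rfind, hl, PySem.Chars.rfind.go,
        show l.drop (m+1) = [] from List.drop_eq_nil_of_le (by omega)]
      simp [List.isPrefixOf]
    by_cases h : c = '-'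
    · subst h; simp
    · rw [beq_false_of_ne h]
      simp only [Bool.false_eq_true, if_false, if_neg h]
      rw [rfind_go_append l c m (by omega), hrl]

theorem master (l : List Char) :
    blocksLoop l.reverse 0 =
      (((l.drop (PySem.Chars.rfind l ['-'] + 1).toNat).count '+' : Nat) : Int) := by
  induction l using List.reverseRecOn with
  | nil => decide
  | append_singleton l c ih =>
    have hrf : PySem.Chars.rfind (l ++ [c]) ['-'] =
        if c = '-' then (l.length : Int) else PySem.Chars.rfind l ['-'] := by
      rw [PySem.Chars.rfind]
      rw [show (l ++ [c]).length = l.length + 1 by simp]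
      rw [PySem.Chars.rfind.go]
      rw [show (l ++ [c]).drop (l.length + 1) = [] from List.drop_eq_nil_of_le (by simp)]
      simp only [List.isPrefixOf, Bool.false_eq_true, if_false]
      exact rfind_go_top l c
    rw [List.reverse_append]
    simp only [List.reverse_singleton, List.singleton_append]
    rw [hrf]
    by_cases h1 : c = '+'
    · subst h1
      have hne : ('+' : Char) ≠ '-' := by decide
      rw [if_neg hne]
      simp only [blocksLoop, if_true]
      rw [blocksLoop_shift, ih]
      have hb := rfind_dash_lt l
      have hge := rfind_dash_ge l
      rw [List.drop_append_of_le_length (by omega)]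
      rw [List.count_append]
      simp
      omega
    · by_cases h2 : c = '-'
      · subst h2
        rw [if_pos rfl]
        simp only [blocksLoop, if_neg h1]
        rw [show ((l.length : Int) + 1).toNat = l.length + 1 by omega]
        rw [List.drop_eq_nil_of_le (by simp)]
        simp
      · rw [if_neg h2]
        simp only [blocksLoop, if_neg h1, if_neg h2]
        rw [ih]
        have hb := rfind_dash_lt l
        have hge := rfind_dash_ge l
        rw [List.drop_append_of_le_length (by omega)]
        rw [List.count_append]
        simp [List.count_singleton, beq_false_of_ne h1]

-- ===== VERDICT (by name: the statement is the Claim_ definition above) =====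
theorem blocks_before_space_spec : Claim_equal_blocks_before_space := by
  intro y _
  simp only [Spec_blocks_before_space, blocks_before_space, blocks_before_space_alt]
  rw [string_reversal_toList, master y.toList]
  have hm : ("-" : String).toList = ['-'] := rfl
  have hp : ("+" : String).toList = ['+'] := rfl
  rw [PySem.Str.rfind_eq, hm]
  have hge := rfind_dash_ge y.toList
  rw [PySem.Str.count_eq, hp, PySem.Str.toList_slice, PySem.Chars.slice_eq_listSlice,
      PySem.List.slice_from y.toList (by omega), count_plus]
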